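-- pv_equiv track=rewrite | github.com/PxlHeartDev/BaoBento | documents.py | genBrds
-- ===== SOURCE A (Python) =====
-- def genBrdArr(val: bool, length: int):
--     return [val for i in range(0, length)]
--
-- def genBrds(columns: int, items: int):
--     borders = [[], [], [], []]
--     borders[0].extend(genBrdArr(False, columns))
--     borders[1].extend(genBrdArr(False, columns))
--     borders[2].extend(genBrdArr(False, columns))
--     borders[3].extend(genBrdArr(False, columns))
--
--     for i in range(0, items):
--         borders[0].extend(genBrdArr(True, columns))
--         borders[1].extend(genBrdArr(False, columns))
--         borders[2].extend(genBrdArr(False, columns))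
--         borders[3].extend(genBrdArr(False, columns))
--
--         # This whole section is a mess. Making it so that the column value isn't reduced by 1 when there's only 2 columns works. Don't ask me how.
--         borders[0].extend(genBrdArr(False, columns - (0 if columns == 2 else 1)))
--         borders[1].extend(genBrdArr(False, columns))
--         borders[2].extend(genBrdArr(False, columns))
--         borders[3].extend(genBrdArr(False, columns))
--     return borders
-- ===== SOURCE B (Python) =====
-- def genBrds(columns: int, items: int):
--     # closed-form assembly: no helper, no loop
--     adj = 0 if columns == 2 else 1
--     m = max(items, 0)
--     total = columns * (2 * m + 1)
--     b0 = [False] * columns + ([True] * columns + [False] * (columns - adj)) * m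
--     return [b0, [False] * total, [False] * total, [False] * total]
-- ===== Notes on version B (the rewrite author's own statement) =====
-- stated objective: simpler
-- what changed: Replaces the genBrdArr helper and the per-item extend loop with closed-form list expressions: borders 1-3 are each [False]*total built directly, and border 0 is a prefix plus a repeated two-segment block via list multiplication.
import Mathlib
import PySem

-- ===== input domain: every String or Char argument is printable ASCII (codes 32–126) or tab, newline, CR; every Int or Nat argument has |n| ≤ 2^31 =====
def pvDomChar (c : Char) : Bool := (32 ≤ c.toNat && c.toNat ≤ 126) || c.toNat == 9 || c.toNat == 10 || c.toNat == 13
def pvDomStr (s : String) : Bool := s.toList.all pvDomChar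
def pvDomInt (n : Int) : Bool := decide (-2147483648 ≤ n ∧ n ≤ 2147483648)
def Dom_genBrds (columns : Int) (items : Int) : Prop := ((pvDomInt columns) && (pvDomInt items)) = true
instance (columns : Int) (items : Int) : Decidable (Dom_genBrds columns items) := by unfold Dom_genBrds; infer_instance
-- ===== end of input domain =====

-- B replaces A's helper and per-item extend loop by closed-form list expressions (same cost, simpler).

-- ===== PORT A =====
-- [val for i in range(0, length)]
def genBrdArr (val : Bool) (length : Int) : List Bool :=
  (PySem.List.pyRange 0 length 1).map (fun _ => val)

def genBrds (columns : Int) (items : Int) : List (List Bool) :=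
  let b : List Bool × List Bool × List Bool × List Bool :=
    (genBrdArr false columns, genBrdArr false columns, genBrdArr false columns, genBrdArr false columns)
  let b := (PySem.List.pyRange 0 items 1).foldl
    (fun (b : List Bool × List Bool × List Bool × List Bool) _ =>
      (b.1 ++ genBrdArr true columns ++ genBrdArr false (columns - (if columns == 2 then 0 else 1)),
       b.2.1 ++ genBrdArr false columns ++ genBrdArr false columns,
       b.2.2.1 ++ genBrdArr false columns ++ genBrdArr false columns,
       b.2.2.2 ++ genBrdArr false columns ++ genBrdArr false columns)) b
  [b.1, b.2.1, b.2.2.1, b.2.2.2]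

-- ===== PORT B =====
-- [x]*n is List.replicate n.toNat x and (xs)*n is (List.replicate n.toNat xs).flatten:
-- exact, since Python's list multiplication treats a negative count as 0 just as Int.toNat does.
def genBrds_alt (columns : Int) (items : Int) : List (List Bool) :=
  let adj : Int := if columns == 2 then 0 else 1
  let m : Int := max items 0
  let total : Int := columns * (2 * m + 1)
  let b0 : List Bool :=
    List.replicate columns.toNat false ++
      (List.replicate m.toNat
        (List.replicate columns.toNat true ++ List.replicate (columns - adj).toNat false)).flatten
  [b0, List.replicate total.toNat false, List.replicate total.toNat false, List.replicate total.toNat false]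

-- ===== PRECONDITION & SPEC =====
def Spec_genBrds (columns : Int) (items : Int) (out : List (List Bool)) : Prop := out = genBrds_alt columns items
instance (columns : Int) (items : Int) (out : List (List Bool)) : Decidable (Spec_genBrds columns items out) := by unfold Spec_genBrds; infer_instance

-- ===== CLAIM (what is proved, stated in full; the proofs are below) =====
def Claim_equal_genBrds : Prop := ∀ (columns : Int) (items : Int), Dom_genBrds columns items → Spec_genBrds columns items (genBrds columns items)

-- ===== LEMMAS AND PROOFS =====

theorem genBrdArr_eq (v : Bool) (n : Int) : genBrdArr v n = List.replicate n.toNat v := by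
  simp [genBrdArr, PySem.List.pyRange_one, List.map_map, Function.comp_def, List.map_const']

theorem flatten_replicate_replicate (n k : ℕ) (v : Bool) :
    (List.replicate n (List.replicate k v)).flatten = List.replicate (n * k) v := by
  induction n with
  | zero => simp
  | succ m ih =>
    rw [List.replicate_succ, List.flatten_cons, ih, ← List.replicate_add]
    congr 1
    ring

theorem fold4_const (l : List Int) (x0 y0 x1 y1 : List Bool) (s0 s1 s2 s3 : List Bool) :
    l.foldl
      (fun (b : List Bool × List Bool × List Bool × List Bool) _ =>
        (b.1 ++ x0 ++ y0, b.2.1 ++ x1 ++ y1, b.2.2.1 ++ x1 ++ y1, b.2.2.2 ++ x1 ++ y1))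
      (s0, s1, s2, s3)
    = (s0 ++ (List.replicate l.length (x0 ++ y0)).flatten,
       s1 ++ (List.replicate l.length (x1 ++ y1)).flatten,
       s2 ++ (List.replicate l.length (x1 ++ y1)).flatten,
       s3 ++ (List.replicate l.length (x1 ++ y1)).flatten) := by
  induction l generalizing s0 s1 s2 s3 with
  | nil => simp
  | cons a t ih =>
    rw [List.foldl_cons, ih]
    simp [List.replicate_succ, List.append_assoc]

theorem toNat_total_eq (c n : Int) :
    (c * (2 * max n 0 + 1)).toNat = c.toNat + n.toNat * (c.toNat + c.toNat) := by
  by_cases hc : c ≤ 0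
  · have h1 : c * (2 * max n 0 + 1) ≤ 0 := by
      have : (0:Int) < 2 * max n 0 + 1 := by omega
      exact mul_nonpos_of_nonpos_of_nonneg hc (le_of_lt this)
    have h2 : c.toNat = 0 := by omega
    simp [Int.toNat_of_nonpos h1, h2]
  · rw [not_le] at hc
    have hcc : c = (c.toNat : Int) := (Int.toNat_of_nonneg (le_of_lt hc)).symm
    have hmm : max n 0 = (n.toNat : Int) := by omega
    rw [hcc, hmm]
    have : ((c.toNat : Int)) * (2 * (n.toNat : Int) + 1)
        = ((c.toNat + n.toNat * (c.toNat + c.toNat) : ℕ) : Int) := by push_cast; ring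
    rw [this, Int.toNat_natCast]
    simp
    have hmc : (max c 0).toNat = c.toNat := by omega
    rw [hmc]

-- ===== VERDICT (by name: the statement is the Claim_ definition above) =====
theorem genBrds_spec : Claim_equal_genBrds := by
  intro columns items _
  unfold Spec_genBrds genBrds genBrds_alt
  simp only [genBrdArr_eq, fold4_const, PySem.List.length_pyRange_one]
  have hm : (max items 0).toNat = items.toNat := by omega
  have hN : (items - 0).toNat = items.toNat := by omega
  rw [hm, hN]
  have hrow : List.replicate columns.toNat false ++
      (List.replicate items.toNat (List.replicate columns.toNat false ++ List.replicate columns.toNat false)).flatten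
      = List.replicate (columns * (2 * max items 0 + 1)).toNat false := by
    rw [← List.replicate_add, flatten_replicate_replicate, ← List.replicate_add, toNat_total_eq]
  simp only [hrow]
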